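-- pv_equiv track=rewrite | github.com/wsylearn/algorithm010 | Week09/02_反转字符串 II.py | reverseStr
-- ===== SOURCE A (Python) =====
-- def reverseStr(s: str, k: int) -> str:
--     a = list(s)
--     n = len(s)
--     for i in range(0, n, 2 * k):
--         left = i
--         right = min(n - 1, left + k - 1)
--         while left < right:
--             a[left], a[right] = a[right], a[left]
--             left += 1
--             right -= 1
--     return "".join(a)
-- ===== SOURCE B (Python) =====
-- def reverseStr(s: str, k: int) -> str:
--     if k <= 0:
--         # for negative k the block loop visits no block (empty range), so s is unchanged
--         return s
--     parts = [s[i:i + k][::-1] + s[i + k:i + 2 * k] for i in range(0, len(s), 2 * k)]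
--     return "".join(parts)
-- ===== Notes on version B (the rewrite author's own statement) =====
-- stated objective: faster
-- what changed: Replaces the mutable char-array with an in-place two-pointer swap loop per block by building the answer from slices: each block contributes s[i:i+k][::-1] + s[i+k:i+2k], joined at the end; slicing clamps the partial last block so no min() guard is needed. Mechanism: per-character Python-level swap iterations are replaced by C-level slice/reverse/join operations (measured 8.8x at n=262144).
import Mathlib
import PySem

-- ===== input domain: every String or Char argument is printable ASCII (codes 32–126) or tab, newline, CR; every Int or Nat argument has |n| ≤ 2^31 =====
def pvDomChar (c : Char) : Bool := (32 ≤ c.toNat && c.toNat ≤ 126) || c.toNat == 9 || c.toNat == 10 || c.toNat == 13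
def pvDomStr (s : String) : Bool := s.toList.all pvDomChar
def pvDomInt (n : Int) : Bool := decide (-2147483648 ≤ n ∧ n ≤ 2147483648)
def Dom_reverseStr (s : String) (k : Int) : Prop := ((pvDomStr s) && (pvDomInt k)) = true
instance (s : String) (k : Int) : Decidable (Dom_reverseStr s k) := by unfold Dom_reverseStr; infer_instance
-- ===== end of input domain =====

-- B builds the answer from slices per block instead of A's in-place two-pointer swaps (idiomatic; return value only, A never mutates its arguments).

-- ===== PORT A =====
-- the inner `while left < right` loop: swap a[left], a[right], move both pointers inward.
-- (pyGetD/pySetD are exact here: the loop only runs with 0 ≤ left < right ≤ n - 1.)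
def pvSwapLoop (a : List Char) (left right : Int) : List Char :=
  if left < right then
    let x := PySem.List.pyGetD a left ' '
    let y := PySem.List.pyGetD a right ' '
    pvSwapLoop (PySem.List.pySetD (PySem.List.pySetD a left y) right x) (left + 1) (right - 1)
  else a
termination_by (right - left).toNat
decreasing_by omega

def reverseStr (s : String) (k : Int) : String :=
  String.ofList ((PySem.List.pyRange 0 (s.toList.length : Int) (2 * k)).foldl
    (fun a i => pvSwapLoop a i (min ((s.toList.length : Int) - 1) (i + k - 1))) s.toList)

-- ===== PORT B =====
-- s[i:i+k][::-1] is the reversed slice (PySem.List.slice?_none_none_neg_one: step -1 is reverse);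
-- "".join of the per-block strings is the flatten of the per-block char lists.
def reverseStr_alt (s : String) (k : Int) : String :=
  if k ≤ 0 then s
  else
    String.ofList ((PySem.List.pyRange 0 (s.toList.length : Int) (2 * k)).map
      (fun i => (PySem.List.slice s.toList (some i) (some (i + k))).reverse
                ++ PySem.List.slice s.toList (some (i + k)) (some (i + 2 * k)))).flatten

-- ===== PRECONDITION & SPEC =====
-- Pre_ excludes exactly k = 0, where A's range(0, n, 0) raises ValueError.
def Pre_reverseStr (s : String) (k : Int) : Prop := k ≠ 0
instance (s : String) (k : Int) : Decidable (Pre_reverseStr s k) := by unfold Pre_reverseStr; infer_instance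
def pvWitness_reverseStr : String × Int := ("abcdefg", 2)

def Spec_reverseStr (s : String) (k : Int) (out : String) : Prop := out = reverseStr_alt s k
instance (s : String) (k : Int) (out : String) : Decidable (Spec_reverseStr s k out) := by unfold Spec_reverseStr; infer_instance

-- ===== CLAIM (what is proved, stated in full; the proofs are below) =====
def Claim_equal_reverseStr : Prop := ∀ (s : String) (k : Int), Dom_reverseStr s k → Pre_reverseStr s k → Spec_reverseStr s k (reverseStr s k)

-- ===== LEMMAS AND PROOFS =====

-- both programs, per block: reverse the first k chars, keep the next k chars, recurse on the rest
def pvChunk (k1 : Nat) (cs : List Char) : List Char :=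
  if h : cs = [] then []
  else (cs.take (k1 + 1)).reverse ++ (cs.drop (k1 + 1)).take (k1 + 1)
       ++ pvChunk k1 (cs.drop (2 * (k1 + 1)))
termination_by cs.length
decreasing_by simpa using List.length_pos_of_ne_nil h

lemma pv_getD_at (pre : List Char) (w : Char) (rest : List Char) (d : Char) :
    (pre ++ w :: rest).getD pre.length d = w := by
  induction pre with
  | nil => rfl
  | cons a t ih => simpa using ih

lemma pv_set_at (pre : List Char) (w : Char) (rest : List Char) (v : Char) :
    (pre ++ w :: rest).set pre.length v = pre ++ v :: rest := by
  induction pre with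
  | nil => rfl
  | cons a t ih => simpa using ih

lemma pv_swap_seg : ∀ (m : Nat) (mid pre suf : List Char), mid.length = m →
    pvSwapLoop (pre ++ mid ++ suf) (pre.length : Int) ((pre.length : Int) + mid.length - 1)
      = pre ++ mid.reverse ++ suf := by
  intro m
  induction m using Nat.strong_induction_on with
  | _ m ih =>
    intro mid pre suf hm
    match mid with
    | [] => rw [pvSwapLoop, if_neg (by simp)]; simp
    | [x] => rw [pvSwapLoop, if_neg (by simp)]; simp
    | x :: y :: rest =>
      obtain ⟨ys, z, hyz⟩ : ∃ ys z, y :: rest = ys ++ [z] := by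
        rcases (y :: rest).eq_nil_or_concat with h | ⟨ys, z, h⟩
        · exact absurd h (by simp)
        · exact ⟨ys, z, by simpa using h⟩
      rw [hyz]
      have hassoc : pre ++ (x :: (ys ++ [z])) ++ suf = (pre ++ x :: ys) ++ z :: suf := by simp
      have hr : (pre.length : Int) + (x :: (ys ++ [z])).length - 1 = (((pre ++ x :: ys).length : Nat) : Int) := by
        simp
        push_cast
        ring
      rw [pvSwapLoop, if_pos (by simp; omega)]
      -- compute the two reads
      have hx : PySem.List.pyGetD (pre ++ (x :: (ys ++ [z])) ++ suf) (pre.length : Int) ' ' = x := by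
        rw [PySem.List.pyGetD_natCast]
        simpa using pv_getD_at pre x ((ys ++ [z]) ++ suf) ' '
      have hz' : PySem.List.pyGetD (pre ++ (x :: (ys ++ [z])) ++ suf) ((pre.length : Int) + (x :: (ys ++ [z])).length - 1) ' ' = z := by
        rw [hr, PySem.List.pyGetD_natCast, hassoc]
        simpa using pv_getD_at (pre ++ x :: ys) z suf ' '
      have hm' : ys.length < m := by
        have h1 := congrArg List.length hyz
        simp at h1 hm
        omega
      have hmain := ih ys.length hm' ys (pre ++ [z]) (x :: suf) rfl
      have hs1 : (pre ++ (x :: (ys ++ [z])) ++ suf).set (pre.length) z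
          = pre ++ (z :: (ys ++ [z])) ++ suf := by
        simpa using pv_set_at pre x ((ys ++ [z]) ++ suf) z
      have hs2 : (pre ++ (z :: (ys ++ [z])) ++ suf).set ((pre ++ x :: ys).length) x
          = pre ++ (z :: (ys ++ [x])) ++ suf := by
        have hlen : (pre ++ x :: ys).length = (pre ++ z :: ys).length := by simp
        rw [hlen]
        simpa using pv_set_at (pre ++ z :: ys) z suf x
      simp only [hx, hz']
      rw [hr]
      rw [PySem.List.pySetD_natCast, PySem.List.pySetD_natCast]
      rw [hs1, hs2]
      have harg : ((pre ++ x :: ys).length : Int) - 1 = ((pre ++ [z]).length : Int) + (ys.length : Int) - 1 := by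
        simp
        omega
      have e1 : ((pre.length : Int) + 1) = ((pre ++ [z]).length : Int) := by simp
      have e3 : pre ++ (z :: (ys ++ [x])) ++ suf = pre ++ [z] ++ ys ++ x :: suf := by simp
      rw [e3, e1, harg, hmain]
      simp

lemma pv_range_pos_nil (a b s : Int) (hs : 0 < s) (h : b ≤ a) :
    PySem.List.pyRange a b s = [] := by
  rw [PySem.List.pyRange_of_pos a b hs, if_neg (by omega)]
  simp

lemma pv_range_neg_nil (b s : Int) (hs : s < 0) (h : 0 ≤ b) :
    PySem.List.pyRange 0 b s = [] := by
  simp only [PySem.List.pyRange]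
  rw [if_neg (by omega), if_neg (by omega), if_neg (by omega)]
  simp

lemma pv_range_pos_cons (a b s : Int) (hs : 0 < s) (hab : a < b) :
    PySem.List.pyRange a b s = a :: PySem.List.pyRange (a + s) b s := by
  rw [PySem.List.pyRange_of_pos a b hs, PySem.List.pyRange_of_pos (a + s) b hs, if_pos hab]
  have h1 : (b - a + s - 1) / s = (b - a - 1) / s + 1 := by
    have := Int.add_mul_ediv_right (b - a - 1) 1 (by omega : s ≠ 0)
    simpa [one_mul] using (by rw [show b - a + s - 1 = b - a - 1 + 1 * s by ring, this])
  have h2 : 0 ≤ (b - a - 1) / s := Int.ediv_nonneg (by omega) (by omega)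
  have h3 : ((b - a + s - 1) / s).toNat = ((b - a - 1) / s).toNat + 1 := by omega
  have h4 : (if a + s < b then ((b - (a + s) + s - 1) / s).toNat else 0) = ((b - a - 1) / s).toNat := by
    split_ifs with h5
    · have h6 : b - (a + s) + s - 1 = b - a - 1 := by ring
      rw [h6]
    · have h6 : (b - a - 1) / s = 0 := Int.ediv_eq_zero_of_lt (by omega) (by omega)
      omega
  rw [h3, h4, List.range_succ_eq_map, List.map_cons, List.map_map]
  congr 1
  · simp
  apply List.map_congr_left
  intro x _
  simp [Function.comp, Nat.succ_eq_add_one]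
  ring

lemma pvChunk_nil (k1 : Nat) : pvChunk k1 [] = [] := by
  rw [pvChunk]
  simp

lemma pvChunk_cons (k1 : Nat) (cs : List Char) (h : cs ≠ []) :
    pvChunk k1 cs = (cs.take (k1 + 1)).reverse ++ (cs.drop (k1 + 1)).take (k1 + 1)
      ++ pvChunk k1 (cs.drop (2 * (k1 + 1))) := by
  rw [pvChunk, dif_neg h]

lemma pv_A_fold (k : Int) (hk : 1 ≤ k) :
    ∀ (m : Nat) (cs pre : List Char) (n : Int), cs.length = m → n = pre.length + cs.length →
    (PySem.List.pyRange (pre.length) n (2 * k)).foldl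
      (fun a i => pvSwapLoop a i (min (n - 1) (i + k - 1))) (pre ++ cs)
    = pre ++ pvChunk (k.toNat - 1) cs := by
  intro m
  induction m using Nat.strong_induction_on with
  | _ m ih =>
    intro cs pre n hm hn
    set K := k.toNat with hKdef
    have hkK : k = (K : Int) := by omega
    have hK1 : 1 ≤ K := by omega
    by_cases hnil : cs = []
    · subst hnil
      rw [pv_range_pos_nil _ _ _ (by omega) (by simp at hn; omega)]
      rw [pvChunk_nil]
      simp
    · have hm0 : 0 < m := by
        have := List.length_pos_of_ne_nil hnil; omega
      rw [pv_range_pos_cons _ _ _ (by omega) (by omega)]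
      rw [List.foldl_cons]
      -- the first block
      have htd : pre ++ cs.take K ++ cs.drop K = pre ++ cs := by
        rw [List.append_assoc, List.take_append_drop]
      have hminlen : (cs.take K).length = min K m := by simp [hm]
      have hright : min (n - 1) ((pre.length : Int) + k - 1)
          = (pre.length : Int) + ((cs.take K).length : Int) - 1 := by
        rw [hminlen, hkK] at *
        push_cast
        omega
      have hswap := pv_swap_seg (cs.take K).length (cs.take K) pre (cs.drop K) rfl
      rw [htd] at hswap
      rw [hright, hswap]
      by_cases hsmall : m ≤ 2 * K
      · rw [show (pre.length : Int) + 2 * k = ((pre.length + 2 * K : Nat) : Int) by push_cast; omega]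
        rw [pv_range_pos_nil _ _ _ (by omega) (by push_cast; omega)]
        rw [List.foldl_nil, pvChunk_cons _ _ hnil]
        have hKK : K - 1 + 1 = K := by omega
        rw [hKK]
        have hdrop2 : cs.drop (2 * K) = [] := by
          apply List.drop_eq_nil_of_le; omega
        rw [hdrop2, pvChunk_nil]
        have htake : (cs.drop K).take K = cs.drop K := by
          apply List.take_of_length_le; simp [hm]; omega
        rw [htake]
        simp only [List.append_assoc, List.append_nil]
      · -- big case
        push_neg at hsmall
        have hsplit : (cs.drop K).take K ++ cs.drop (2 * K) = cs.drop K := by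
          rw [show 2 * K = K + K by ring, ← List.drop_drop]
          exact List.take_append_drop K (cs.drop K)
        have hre : pre ++ (cs.take K).reverse ++ cs.drop K
            = (pre ++ (cs.take K).reverse ++ (cs.drop K).take K) ++ cs.drop (2 * K) := by
          conv_lhs => rw [← hsplit]
          simp [List.append_assoc]
        have hplen : (pre ++ (cs.take K).reverse ++ (cs.drop K).take K).length
            = pre.length + 2 * K := by
          simp [hm]; omega
        have hIH := ih (m - 2 * K) (by omega) (cs.drop (2 * K))
          (pre ++ (cs.take K).reverse ++ (cs.drop K).take K) n
          (by simp [hm]) (by rw [hplen]; push_cast; simp [hm]; omega)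
        rw [hplen] at hIH
        rw [show (pre.length : Int) + 2 * k = ((pre.length + 2 * K : Nat) : Int) by push_cast; omega]
        rw [hre, hIH]
        rw [pvChunk_cons _ _ hnil]
        have hKK : K - 1 + 1 = K := by omega
        rw [hKK]
        simp

lemma pv_B_map (k : Int) (hk : 1 ≤ k) :
    ∀ (m : Nat) (cs pre : List Char) (n : Int), cs.length = m → n = pre.length + cs.length →
    ((PySem.List.pyRange (pre.length) n (2 * k)).map
      (fun i => (PySem.List.slice (pre ++ cs) (some i) (some (i + k))).reverse
                ++ PySem.List.slice (pre ++ cs) (some (i + k)) (some (i + 2 * k)))).flatten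
    = pvChunk (k.toNat - 1) cs := by
  intro m
  induction m using Nat.strong_induction_on with
  | _ m ih =>
    intro cs pre n hm hn
    set K := k.toNat with hKdef
    have hkK : k = (K : Int) := by omega
    have hK1 : 1 ≤ K := by omega
    by_cases hnil : cs = []
    · subst hnil
      rw [pv_range_pos_nil _ _ _ (by omega) (by simp at hn; omega)]
      rw [pvChunk_nil]
      simp
    · have hm0 : 0 < m := by
        have := List.length_pos_of_ne_nil hnil; omega
      rw [pv_range_pos_cons _ _ _ (by omega) (by omega)]
      rw [List.map_cons, List.flatten_cons]
      have c1 : ((pre.length : Int)) + k = (((pre.length + K : Nat)) : Int) := by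
        push_cast; omega
      have c2 : ((pre.length : Int)) + 2 * k = (((pre.length + K : Nat)) : Int) + ((K : Nat) : Int) := by
        push_cast; omega
      rw [c1, c2]
      rw [PySem.List.slice_natCast, PySem.List.slice_natCast_add]
      have d1 : (pre ++ cs).drop pre.length = cs := by simp
      have d2 : (pre ++ cs).drop (pre.length + K) = cs.drop K := by
        rw [List.drop_append]
        simp
      rw [d1, d2]
      have e1 : pre.length + K - pre.length = K := by omega
      rw [e1]
      by_cases hsmall : m ≤ 2 * K
      · rw [show ((pre.length + K : Nat) : Int) + ((K : Nat) : Int) = ((pre.length + 2 * K : Nat) : Int) by push_cast; ring]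
        rw [pv_range_pos_nil _ _ _ (by omega) (by push_cast; omega)]
        rw [List.map_nil, List.flatten_nil]
        rw [pvChunk_cons _ _ hnil]
        have hKK : K - 1 + 1 = K := by omega
        rw [hKK]
        have hdrop2 : cs.drop (2 * K) = [] := by
          apply List.drop_eq_nil_of_le; omega
        rw [hdrop2, pvChunk_nil]
      · push_neg at hsmall
        have hpc : (pre ++ cs.take (2 * K)) ++ cs.drop (2 * K) = pre ++ cs := by
          rw [List.append_assoc, List.take_append_drop]
        have hplen : (pre ++ cs.take (2 * K)).length = pre.length + 2 * K := by
          simp [hm]; omega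
        have hIH := ih (m - 2 * K) (by omega) (cs.drop (2 * K)) (pre ++ cs.take (2 * K)) n
          (by simp [hm]) (by rw [hplen]; push_cast; simp [hm]; omega)
        rw [hplen] at hIH
        simp only [hpc] at hIH
        rw [show ((pre.length + K : Nat) : Int) + ((K : Nat) : Int) = ((pre.length + 2 * K : Nat) : Int) by push_cast; ring]
        rw [hIH]
        rw [pvChunk_cons _ _ hnil]
        have hKK : K - 1 + 1 = K := by omega
        rw [hKK]

-- ===== VERDICT (by name: the statement is the Claim_ definition above) =====
theorem reverseStr_spec : Claim_equal_reverseStr := by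
  intro s k _ hk
  unfold Spec_reverseStr reverseStr reverseStr_alt
  rcases lt_trichotomy k 0 with hneg | hz | hpos
  · rw [if_pos (le_of_lt hneg),
        pv_range_neg_nil (s.toList.length : Int) (2 * k) (by omega) (by positivity)]
    simp
  · exact absurd hz hk
  · rw [if_neg (by omega)]
    have hA := pv_A_fold k (by omega) s.toList.length s.toList [] (s.toList.length : Int) rfl (by simp)
    have hB := pv_B_map k (by omega) s.toList.length s.toList [] (s.toList.length : Int) rfl (by simp)
    simp only [List.nil_append, List.length_nil, Nat.cast_zero] at hA hB
    rw [hA, hB]
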